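-- pv_equiv track=rewrite | github.com/moisesdelgadillo/IA_P2_E3 | 49_AI_MejorHipotesisActual.py | mejor_hipotesis
-- ===== SOURCE A (Python) =====
-- def mejor_hipotesis(datos_entrenamiento, atributos_clase):
--     # Inicializamos la mejor hipótesis como None
--     mejor_hipotesis = None
--     # Iteramos sobre cada instancia en los datos de entrenamiento
--     for instancia in datos_entrenamiento:
--         # Si es la primera instancia, la tomamos como la mejor hipótesis
--         if mejor_hipotesis is None:
--             mejor_hipotesis = instancia
--         else:
--             # Comparamos cada atributo de clase y actualizamos la mejor hipótesis si es necesario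
--             for i in range(len(atributos_clase)):
--                 if instancia[i] != mejor_hipotesis[i]:
--                     mejor_hipotesis[i] = '?'
--     # Devolvemos la mejor hipótesis encontrada
--     return mejor_hipotesis
-- ===== SOURCE B (Python) =====
-- def mejor_hipotesis(datos_entrenamiento, atributos_clase):
--     items = list(datos_entrenamiento)
--     if not items:
--         return None
--     first = items[0]
--     rest = items[1:]
--     # column-major: one pass per attribute, mark '?' if any later instance differs
--     for i in range(len(atributos_clase)):
--         if any(inst[i] != first[i] for inst in rest):
--             first[i] = '?'
--     return first
-- ===== Notes on version B (the rewrite author's own statement) =====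
-- stated objective: alternative
-- what changed: Row-major loop that repeatedly rewrites the evolving hypothesis is replaced by a column-major pass: for each attribute index, a short-circuiting any() over the remaining instances decides once whether to mark '?' against the untouched first instance.
-- outside the precondition, e.g. on mejor_hipotesis([], ['x']): A returns None, B returns None; on mejor_hipotesis([['a'], ['b', 'c']], ['x', 'y']): A raises IndexError, B raises IndexError
import Mathlib
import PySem

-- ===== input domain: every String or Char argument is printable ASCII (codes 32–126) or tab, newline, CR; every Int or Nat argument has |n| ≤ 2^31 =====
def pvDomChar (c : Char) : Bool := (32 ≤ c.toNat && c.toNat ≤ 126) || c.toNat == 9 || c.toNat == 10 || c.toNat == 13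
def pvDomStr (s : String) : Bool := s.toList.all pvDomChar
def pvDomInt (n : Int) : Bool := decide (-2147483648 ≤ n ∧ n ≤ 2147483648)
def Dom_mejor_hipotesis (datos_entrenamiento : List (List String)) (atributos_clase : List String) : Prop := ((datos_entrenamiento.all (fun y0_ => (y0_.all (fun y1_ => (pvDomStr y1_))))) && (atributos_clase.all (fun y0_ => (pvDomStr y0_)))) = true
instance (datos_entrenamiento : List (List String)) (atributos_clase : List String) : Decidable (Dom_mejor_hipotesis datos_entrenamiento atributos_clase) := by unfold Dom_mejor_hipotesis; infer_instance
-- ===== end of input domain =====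

-- B replaces A's row-major rewrite of the evolving hypothesis by a column-major pass (one any() per
-- attribute against the untouched first row) — objective: alternative decomposition, same cost.
-- Both A and B mutate the first row of datos_entrenamiento in place in Python; the equivalence proved
-- here is about the returned value (which is that same row in both).

-- ===== PORT A =====
-- row-major: fold over the instances, the hypothesis starts as none and, once seeded with the first
-- instance, is rewritten index by index (range over len(atributos_clase)) against each later instance
def mejor_hipotesis (datos_entrenamiento : List (List String)) (atributos_clase : List String) : List String :=
  (datos_entrenamiento.foldl
    (fun mh instancia =>
      match mh with
      | none => some instancia
      | some h => some ((List.range atributos_clase.length).foldl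
          (fun h i => if instancia.getD i "" != h.getD i "" then h.set i "?" else h) h))
    none).getD []

-- ===== PORT B =====
-- column-major: for each attribute index, one short-circuiting any over the remaining instances
def mejor_hipotesis_alt (datos_entrenamiento : List (List String)) (atributos_clase : List String) : List String :=
  match datos_entrenamiento with
  | [] => []
  | first :: rest =>
    (List.range atributos_clase.length).foldl
      (fun f i => if rest.any (fun inst => inst.getD i "" != f.getD i "") then f.set i "?" else f)
      first

-- ===== PRECONDITION & SPEC =====
-- Pre_ excludes (a) empty datos_entrenamiento, where A returns None (no List String value), and
-- (b) inputs with ≥ 2 instances where some instance is shorter than atributos_clase, where A raises IndexError.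
def Pre_mejor_hipotesis (datos_entrenamiento : List (List String)) (atributos_clase : List String) : Prop :=
  datos_entrenamiento ≠ [] ∧
  (1 < datos_entrenamiento.length →
    ∀ inst ∈ datos_entrenamiento, atributos_clase.length ≤ inst.length)
instance (datos_entrenamiento : List (List String)) (atributos_clase : List String) : Decidable (Pre_mejor_hipotesis datos_entrenamiento atributos_clase) := by unfold Pre_mejor_hipotesis; infer_instance

def pvWitness_mejor_hipotesis : List (List String) × List String :=
  ([["a", "b"], ["a", "c"]], ["x", "y"])

def Spec_mejor_hipotesis (datos_entrenamiento : List (List String)) (atributos_clase : List String) (out : List String) : Prop := out = mejor_hipotesis_alt datos_entrenamiento atributos_clase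
instance (datos_entrenamiento : List (List String)) (atributos_clase : List String) (out : List String) : Decidable (Spec_mejor_hipotesis datos_entrenamiento atributos_clase out) := by unfold Spec_mejor_hipotesis; infer_instance

-- ===== CLAIM (what is proved, stated in full; the proofs are below) =====
def Claim_equal_mejor_hipotesis : Prop := ∀ (datos_entrenamiento : List (List String)) (atributos_clase : List String), Dom_mejor_hipotesis datos_entrenamiento atributos_clase → Pre_mejor_hipotesis datos_entrenamiento atributos_clase → Spec_mejor_hipotesis datos_entrenamiento atributos_clase (mejor_hipotesis datos_entrenamiento atributos_clase)

-- ===== LEMMAS AND PROOFS =====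

-- Both ports' inner computation is a fold over List.range n that may set index i to "?" depending
-- only on index i and the current value at i.
def pvSetFold (c : String → Nat → Bool) (n : Nat) (h0 : List String) : List String :=
  (List.range n).foldl (fun h i => if c (h.getD i "") i then h.set i "?" else h) h0

lemma pvSetFold_length_aux (c : String → Nat → Bool) :
    ∀ (l : List Nat) (h0 : List String),
      (l.foldl (fun h i => if c (h.getD i "") i then h.set i "?" else h) h0).length = h0.length := by
  intro l
  induction l with
  | nil => intro h0; rfl
  | cons x xs ih =>
    intro h0
    rw [List.foldl_cons]
    by_cases hc : c (h0.getD x "") x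
    · rw [if_pos hc, ih, List.length_set]
    · rw [if_neg hc, ih]

lemma pvSetFold_length (c : String → Nat → Bool) (n : Nat) (h0 : List String) :
    (pvSetFold c n h0).length = h0.length := pvSetFold_length_aux c (List.range n) h0

lemma pvSetFold_getElem? (c : String → Nat → Bool) (n : Nat) (h0 : List String) :
    ∀ j, (pvSetFold c n h0)[j]? =
      if j < n ∧ j < h0.length ∧ c (h0.getD j "") j then some "?" else h0[j]? := by
  induction n with
  | zero => intro j; simp [pvSetFold]
  | succ n ih =>
    intro j
    have hlen := pvSetFold_length c n h0
    have hn? : (pvSetFold c n h0)[n]? = h0[n]? := by rw [ih n]; simp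
    have hnD : (pvSetFold c n h0).getD n "" = h0.getD n "" := by
      rw [List.getD_eq_getElem?_getD, List.getD_eq_getElem?_getD, hn?]
    have hstep : pvSetFold c (n + 1) h0 =
        if c ((pvSetFold c n h0).getD n "") n
        then (pvSetFold c n h0).set n "?" else pvSetFold c n h0 := by
      unfold pvSetFold
      rw [List.range_succ, List.foldl_append]
      simp
    rw [hstep, hnD]
    by_cases hc : c (h0.getD n "") n
    · rw [if_pos hc, List.getElem?_set, hlen]
      by_cases hj : n = j
      · subst hj
        by_cases hl : n < h0.length
        · rw [if_pos rfl, if_pos hl, if_pos ⟨by omega, hl, hc⟩]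
        · rw [if_pos rfl, if_neg hl, if_neg (fun h => hl h.2.1),
            List.getElem?_eq_none (by omega)]
      · rw [if_neg hj, ih j]
        exact if_congr ⟨fun ⟨a, b, d⟩ => ⟨by omega, b, d⟩, fun ⟨a, b, d⟩ => ⟨by omega, b, d⟩⟩ rfl rfl
    · rw [if_neg hc, ih j]
      by_cases hj : j = n
      · subst hj
        rw [if_neg (fun h => absurd h.1 (lt_irrefl j)), if_neg (fun h => hc h.2.2)]
      · exact if_congr ⟨fun ⟨a, b, d⟩ => ⟨by omega, b, d⟩, fun ⟨a, b, d⟩ => ⟨by omega, b, d⟩⟩ rfl rfl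

-- A's outer fold, after being seeded with the first instance
def pvAFold (n : Nat) (h0 : List String) (rest : List (List String)) : List String :=
  rest.foldl (fun h instancia => pvSetFold (fun v i => instancia.getD i "" != v) n h) h0

-- A's option-valued fold over all instances equals the seeded fold over the tail
lemma pvA_seed (atts : List String) :
    ∀ (rest : List (List String)) (first : List String),
      (rest.foldl
        (fun mh instancia =>
          match mh with
          | none => some instancia
          | some h => some ((List.range atts.length).foldl
              (fun h i => if instancia.getD i "" != h.getD i "" then h.set i "?" else h) h))
        (some first)).getD []
      = pvAFold atts.length first rest := by
  intro rest
  induction rest with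
  | nil => intro first; rfl
  | cons x xs ih => intro first; exact ih _

lemma pvAFold_getElem? (n : Nat) (first : List String) (rest : List (List String)) :
    ∀ (h0 : List String) (Q : Nat → Bool),
      h0.length = first.length →
      (∀ j, h0[j]? = if j < n ∧ j < first.length ∧ Q j then some "?" else first[j]?) →
      ∀ j, (pvAFold n h0 rest)[j]? =
        if j < n ∧ j < first.length ∧
            (Q j || rest.any (fun inst => inst.getD j "" != first.getD j ""))
        then some "?" else first[j]? := by
  induction rest with
  | nil =>
    intro h0 Q hlen hchar j
    simp only [pvAFold, List.foldl_nil, List.any_nil, Bool.or_false]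
    exact hchar j
  | cons inst rest ih =>
    intro h0 Q hlen hchar j
    have hstep : pvAFold n h0 (inst :: rest) =
        pvAFold n (pvSetFold (fun v i => inst.getD i "" != v) n h0) rest := rfl
    rw [hstep]
    have hlen1 : (pvSetFold (fun v i => inst.getD i "" != v) n h0).length = first.length := by
      rw [pvSetFold_length]; exact hlen
    have hchar1 : ∀ j, (pvSetFold (fun v i => inst.getD i "" != v) n h0)[j]? =
        if j < n ∧ j < first.length ∧
            (Q j || (inst.getD j "" != first.getD j ""))
        then some "?" else first[j]? := by
      intro j
      rw [pvSetFold_getElem?, hlen]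
      by_cases hjn : j < n
      · by_cases hjl : j < first.length
        · by_cases hQ : Q j
          · have h0j : h0[j]? = some "?" := by rw [hchar j]; simp [hjn, hjl, hQ]
            have h0d : h0.getD j "" = "?" := by
              rw [List.getD_eq_getElem?_getD, h0j]; rfl
            rw [h0d, h0j, ite_self, if_pos ⟨hjn, hjl, by simp [hQ]⟩]
          · have h0j : h0[j]? = first[j]? := by rw [hchar j]; simp [hQ]
            have h0d : h0.getD j "" = first.getD j "" := by
              rw [List.getD_eq_getElem?_getD, List.getD_eq_getElem?_getD, h0j]
            rw [h0d, h0j]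
            exact if_congr (by simp [hQ]) rfl rfl
        · have h0j : h0[j]? = first[j]? := by rw [hchar j]; simp [hjl]
          rw [h0j, if_neg (fun h => hjl h.2.1), if_neg (fun h => hjl h.2.1)]
      · have h0j : h0[j]? = first[j]? := by rw [hchar j]; simp [hjn]
        rw [h0j, if_neg (fun h => hjn h.1), if_neg (fun h => hjn h.1)]
    have := ih (pvSetFold (fun v i => inst.getD i "" != v) n h0)
      (fun j => Q j || (inst.getD j "" != first.getD j "")) hlen1 hchar1 j
    rw [this]
    simp [List.any_cons, Bool.or_assoc]

-- ===== VERDICT (by name: the statement is the Claim_ definition above) =====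
theorem mejor_hipotesis_spec : Claim_equal_mejor_hipotesis := by
  intro datos atts _hdom hpre
  unfold Spec_mejor_hipotesis
  obtain ⟨hne, _⟩ := hpre
  match datos with
  | [] => exact absurd rfl hne
  | first :: rest =>
    have hA : mejor_hipotesis (first :: rest) atts = pvAFold atts.length first rest := by
      unfold mejor_hipotesis
      rw [List.foldl_cons]
      exact pvA_seed atts rest first
    have hB : mejor_hipotesis_alt (first :: rest) atts =
        pvSetFold (fun v i => rest.any (fun inst => inst.getD i "" != v)) atts.length first := rfl
    rw [hA, hB]
    apply List.ext_getElem?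
    intro j
    rw [pvSetFold_getElem?]
    rw [pvAFold_getElem? atts.length first rest first (fun _ => false) rfl (by intro j; simp) j]
    simp
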